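-- pv_equiv track=rewrite | github.com/lany42/aoc | 2023/day9.py | reduce_diff
-- ===== SOURCE A (Python) =====
-- def reduce_diff(data):
--     levels = [data]
--     while True:
--         levels.append([data[i] - data[i - 1] for i in range(1, len(data))])
--         if all([i == 0 for i in levels[-1]]):
--             break
--
--         data = levels[-1]
--
--     return levels
-- ===== SOURCE B (Python) =====
-- def reduce_diff(data):
--     diffs = [b - a for a, b in zip(data, data[1:])]
--     if all(d == 0 for d in diffs):
--         return [data, diffs]
--     return [data] + reduce_diff(diffs)
-- ===== Notes on version B (the rewrite author's own statement) =====
-- stated objective: simpler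
-- what changed: Replaces the while-loop with an explicit levels accumulator by a direct recursion on the zip-based difference row, returning [data, diffs] at the all-zero base case.
import Mathlib
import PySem

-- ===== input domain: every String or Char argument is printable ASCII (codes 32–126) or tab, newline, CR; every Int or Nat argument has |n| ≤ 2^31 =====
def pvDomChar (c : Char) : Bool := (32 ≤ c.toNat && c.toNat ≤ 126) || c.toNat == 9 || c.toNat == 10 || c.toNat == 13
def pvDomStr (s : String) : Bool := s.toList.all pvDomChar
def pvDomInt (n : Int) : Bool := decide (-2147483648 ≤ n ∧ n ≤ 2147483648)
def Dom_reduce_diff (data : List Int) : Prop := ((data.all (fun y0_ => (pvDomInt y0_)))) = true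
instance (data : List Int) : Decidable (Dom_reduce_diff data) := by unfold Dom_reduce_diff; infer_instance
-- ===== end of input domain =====

-- B replaces A's while-loop with an explicit `levels` accumulator by a direct
-- recursion on a zip-based difference row (same result; objective: simpler).


-- ===== PORT A =====
-- [data[i] - data[i-1] for i in range(1, len(data))]
def pvDiffRowA (data : List Int) : List Int :=
  (PySem.List.pyRange 1 data.length 1).map
    (fun i => PySem.List.pyGetD data i 0 - PySem.List.pyGetD data (i - 1) 0)

theorem pvDiffRowA_length_lt (data : List Int) (h : pvDiffRowA data ≠ []) :
    (pvDiffRowA data).length < data.length := by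
  have hlen : (pvDiffRowA data).length = ((data.length : Int) - 1).toNat := by
    simp [pvDiffRowA, PySem.List.length_pyRange_one]
  have hne : (pvDiffRowA data).length ≠ 0 := by
    simpa [List.length_eq_zero_iff] using h
  omega

-- the `while True` loop, with state (data, levels)
def reduce_diff_loop (data : List Int) (levels : List (List Int)) : List (List Int) :=
  if h : (pvDiffRowA data).all (fun i => i == 0) then levels ++ [pvDiffRowA data]
  else reduce_diff_loop (pvDiffRowA data) (levels ++ [pvDiffRowA data])
termination_by data.length
decreasing_by exact pvDiffRowA_length_lt data (fun hnil => by simp [hnil] at h)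

def reduce_diff (data : List Int) : List (List Int) :=
  reduce_diff_loop data [data]

-- ===== PORT B =====
-- diffs = [b - a for a, b in zip(data, data[1:])]
def pvDiffRowB (data : List Int) : List Int :=
  List.zipWith (fun a b => b - a) data (PySem.List.slice data (some 1) none)

theorem pvDiffRowB_length_lt (data : List Int) (h : pvDiffRowB data ≠ []) :
    (pvDiffRowB data).length < data.length := by
  have hne : (pvDiffRowB data).length ≠ 0 := by
    simpa [List.length_eq_zero_iff] using h
  have hlen : (pvDiffRowB data).length ≤ data.length - 1 := by
    simp [pvDiffRowB, PySem.List.slice_from_one]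
  omega

def reduce_diff_alt (data : List Int) : List (List Int) :=
  if h : (pvDiffRowB data).all (fun d => d == 0) then [data, pvDiffRowB data]
  else [data] ++ reduce_diff_alt (pvDiffRowB data)
termination_by data.length
decreasing_by exact pvDiffRowB_length_lt data (fun hnil => by simp [hnil] at h)

-- ===== PRECONDITION & SPEC =====
def Spec_reduce_diff (data : List Int) (out : List (List Int)) : Prop := out = reduce_diff_alt data
instance (data : List Int) (out : List (List Int)) : Decidable (Spec_reduce_diff data out) := by unfold Spec_reduce_diff; infer_instance

-- ===== CLAIM (what is proved, stated in full; the proofs are below) =====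
def Claim_equal_reduce_diff : Prop := ∀ (data : List Int), Dom_reduce_diff data → Spec_reduce_diff data (reduce_diff data)

-- ===== LEMMAS AND PROOFS =====

-- the two difference rows are the same list
theorem diffRow_eq (data : List Int) : pvDiffRowA data = pvDiffRowB data := by
  apply List.ext_getElem
  · simp [pvDiffRowA, pvDiffRowB, PySem.List.length_pyRange_one, PySem.List.slice_from_one]
  · intro k h1 h2
    have hk : k < data.length - 1 := by
      simp [pvDiffRowA, PySem.List.length_pyRange_one] at h1; omega
    simp only [pvDiffRowA, pvDiffRowB, List.getElem_map, List.getElem_zipWith,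
      PySem.List.getElem_pyRange_one, PySem.List.slice_from_one]
    have e2 : (1 : Int) + (k : Int) - 1 = ((k : Nat) : Int) := by ring
    have e1 : (1 : Int) + (k : Int) = ((k + 1 : Nat) : Int) := by push_cast; ring
    rw [e2, e1, PySem.List.pyGetD_natCast, PySem.List.pyGetD_natCast]
    have hb1 : k + 1 < data.length := by omega
    have hb2 : k < data.length := by omega
    simp [List.getD_eq_getElem?_getD, hb1, hb2, List.getElem_tail]

-- B's level list always starts with the input row
theorem alt_head (data : List Int) :
    reduce_diff_alt data = data :: (reduce_diff_alt data).drop 1 := by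
  rw [reduce_diff_alt]
  split <;> simp

-- the loop appends exactly the tail of B's level list
theorem loop_eq_alt_tail (data : List Int) (levels : List (List Int)) :
    reduce_diff_loop data levels = levels ++ (reduce_diff_alt data).drop 1 := by
  induction data, levels using reduce_diff_loop.induct with
  | case1 data levels h =>
      have hB : ((pvDiffRowB data).all fun d => d == 0) = true := by
        rw [← diffRow_eq]; exact h
      rw [reduce_diff_loop, reduce_diff_alt, dif_pos h, dif_pos hB, diffRow_eq]
      simp
  | case2 data levels h ih =>
      have hB : ¬ ((pvDiffRowB data).all fun d => d == 0) = true := by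
        rw [← diffRow_eq]; exact h
      rw [reduce_diff_loop, dif_neg h, ih, diffRow_eq]
      conv_rhs => rw [reduce_diff_alt, dif_neg hB]
      rw [List.append_assoc]
      congr 1
      rw [List.singleton_append, ← alt_head]
      simp

-- ===== VERDICT (by name: the statement is the Claim_ definition above) =====
theorem reduce_diff_spec : Claim_equal_reduce_diff := by
  intro data _
  unfold Spec_reduce_diff reduce_diff
  rw [loop_eq_alt_tail, List.singleton_append, ← alt_head]
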